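-- pv_equiv track=rewrite | github.com/maglili/coursera_algo_c1 | week4/test.py | remove_old_vertice_while_add_new
-- ===== SOURCE A (Python) =====
-- def remove_old_vertice_while_add_new(array, vertice1, vertice2, new_node):
--     while (vertice1 in array) or (vertice2 in array):
--         if vertice1 in array:
--             array.remove(vertice1)
--             array.append(new_node)
--         if vertice2 in array:
--             array.remove(vertice2)
--             array.append(new_node)
--     return array
-- ===== SOURCE B (Python) =====
-- def remove_old_vertice_while_add_new(array, vertice1, vertice2, new_node):
--     kept = [x for x in array if x != vertice1 and x != vertice2]
--     removed = len(array) - len(kept)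
--     array[:] = kept + [new_node] * removed
--     return array
-- ===== Notes on version B (the rewrite author's own statement) =====
-- stated objective: simpler
-- what changed: Replaces the while-loop of repeated membership tests and first-occurrence removals with a single filtering pass followed by appending one new_node per removed element (same in-place mutation of the argument).
import Mathlib
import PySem

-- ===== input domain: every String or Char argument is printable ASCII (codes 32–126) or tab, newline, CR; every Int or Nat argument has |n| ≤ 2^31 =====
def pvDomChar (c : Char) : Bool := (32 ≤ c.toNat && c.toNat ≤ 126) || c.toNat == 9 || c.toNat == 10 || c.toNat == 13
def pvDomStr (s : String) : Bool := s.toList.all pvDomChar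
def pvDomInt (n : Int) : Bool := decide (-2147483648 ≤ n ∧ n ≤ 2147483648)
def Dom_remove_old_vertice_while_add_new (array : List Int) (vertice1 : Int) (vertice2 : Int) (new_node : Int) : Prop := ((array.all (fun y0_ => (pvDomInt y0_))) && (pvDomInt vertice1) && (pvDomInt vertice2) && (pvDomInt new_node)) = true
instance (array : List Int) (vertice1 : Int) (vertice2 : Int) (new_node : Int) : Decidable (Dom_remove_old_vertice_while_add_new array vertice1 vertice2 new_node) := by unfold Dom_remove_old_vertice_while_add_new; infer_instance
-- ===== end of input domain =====

-- B replaces A's repeated scan-and-remove while-loop by one filtering pass plus appended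
-- copies of new_node (objective: simpler, one pass). A mutates `array` in place; B performs the same
-- in-place mutation via slice assignment; the equivalence proved here is about the return value.

-- ===== PORT A =====
-- the while loop; `fuel = array.length` bounds the iterations (under Pre_ each iteration
-- removes at least one element, so this fuel is sufficient; fuel only makes the loop total)
def pvLoopA (vertice1 vertice2 new_node : Int) : Nat → List Int → List Int
  | 0, l => l
  | fuel + 1, l =>
    if l.contains vertice1 || l.contains vertice2 then
      let l1 := if l.contains vertice1 then l.erase vertice1 ++ [new_node] else l
      let l2 := if l1.contains vertice2 then l1.erase vertice2 ++ [new_node] else l1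
      pvLoopA vertice1 vertice2 new_node fuel l2
    else l

def remove_old_vertice_while_add_new (array : List Int) (vertice1 : Int) (vertice2 : Int) (new_node : Int) : List Int :=
  pvLoopA vertice1 vertice2 new_node array.length array

-- ===== PORT B =====
def remove_old_vertice_while_add_new_alt (array : List Int) (vertice1 : Int) (vertice2 : Int) (new_node : Int) : List Int :=
  let kept := array.filter (fun x => x != vertice1 && x != vertice2)
  kept ++ List.replicate (array.length - kept.length) new_node

-- ===== PRECONDITION & SPEC =====
-- Pre_ excludes exactly the inputs on which A DIVERGES (never returns): when new_node equals
-- vertice1 or vertice2 and either vertex occurs in array, each removal re-appends the removed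
-- value and the while loop never terminates.
def Pre_remove_old_vertice_while_add_new (array : List Int) (vertice1 : Int) (vertice2 : Int) (new_node : Int) : Prop :=
  (new_node ≠ vertice1 ∧ new_node ≠ vertice2) ∨ (vertice1 ∉ array ∧ vertice2 ∉ array)
instance (array : List Int) (vertice1 : Int) (vertice2 : Int) (new_node : Int) : Decidable (Pre_remove_old_vertice_while_add_new array vertice1 vertice2 new_node) := by unfold Pre_remove_old_vertice_while_add_new; infer_instance

def pvWitness_remove_old_vertice_while_add_new : List Int × Int × Int × Int := ([1, 2, 3, 2, 1], 1, 2, 9)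

def Spec_remove_old_vertice_while_add_new (array : List Int) (vertice1 : Int) (vertice2 : Int) (new_node : Int) (out : List Int) : Prop := out = remove_old_vertice_while_add_new_alt array vertice1 vertice2 new_node
instance (array : List Int) (vertice1 : Int) (vertice2 : Int) (new_node : Int) (out : List Int) : Decidable (Spec_remove_old_vertice_while_add_new array vertice1 vertice2 new_node out) := by unfold Spec_remove_old_vertice_while_add_new; infer_instance

-- ===== CLAIM (what is proved, stated in full; the proofs are below) =====
def Claim_equal_remove_old_vertice_while_add_new : Prop := ∀ (array : List Int) (vertice1 : Int) (vertice2 : Int) (new_node : Int), Dom_remove_old_vertice_while_add_new array vertice1 vertice2 new_node → Pre_remove_old_vertice_while_add_new array vertice1 vertice2 new_node → Spec_remove_old_vertice_while_add_new array vertice1 vertice2 new_node (remove_old_vertice_while_add_new array vertice1 vertice2 new_node)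

-- ===== LEMMAS AND PROOFS =====

-- filtering by a predicate false at v commutes with erasing the first occurrence of v
theorem pv_filter_erase (l : List Int) (p : Int → Bool) (v : Int) (h : p v = false) :
    (l.erase v).filter p = l.filter p := by
  induction l with
  | nil => rfl
  | cons a t ih =>
    by_cases hav : a = v
    · subst hav; simp [List.erase_cons_head, h]
    · rw [List.erase_cons_tail (by simp [hav])]
      simp [List.filter_cons, ih]

-- one removal step: filter grows by [new_node], length is unchanged, kept-length grows by 1
theorem pv_step (l : List Int) (v nn : Int) (p : Int → Bool) (hmem : v ∈ l)
    (hpv : p v = false) (hpn : p nn = true) :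
    ((l.erase v ++ [nn]).filter p = l.filter p ++ [nn]) ∧
    (l.erase v ++ [nn]).length = l.length ∧
    (l.filter p).length < l.length := by
  refine ⟨?_, ?_, ?_⟩
  · rw [List.filter_append, pv_filter_erase l p v hpv]
    simp [hpn]
  · have := List.length_erase_of_mem hmem
    have : 1 ≤ l.length := List.length_pos_of_mem hmem
    simp [List.length_erase_of_mem hmem]
    omega
  · exact List.length_filter_lt_length_iff_exists.mpr ⟨v, hmem, by simp [hpv]⟩

-- gluing: appending the already-produced new_nodes back onto the remaining replicate block
theorem pv_recombine (f : List Int) (nn : Int) (n r : Nat) (hr : f.length + r <= n) :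
    (f ++ List.replicate r nn) ++ List.replicate (n - (f ++ List.replicate r nn).length) nn
      = f ++ List.replicate (n - f.length) nn := by
  rw [List.append_assoc]
  congr 1
  rw [← List.replicate_add]
  congr 1
  simp only [List.length_append, List.length_replicate]
  omega

-- the loop invariant: with enough fuel, the while loop yields the kept elements followed by
-- one new_node per removed element
theorem pv_loop_eq (v1 v2 nn : Int) (h1 : nn ≠ v1) (h2 : nn ≠ v2) :
    ∀ (fuel : Nat) (l : List Int),
      l.length - (l.filter (fun x => x != v1 && x != v2)).length ≤ fuel →
      pvLoopA v1 v2 nn fuel l =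
        l.filter (fun x => x != v1 && x != v2) ++
          List.replicate (l.length - (l.filter (fun x => x != v1 && x != v2)).length) nn := by
  intro fuel
  induction fuel with
  | zero =>
    intro l hf
    have hle : (l.filter (fun x => x != v1 && x != v2)).length ≤ l.length :=
      List.length_filter_le _ _
    have heq : (l.filter (fun x => x != v1 && x != v2)).length = l.length := by omega
    have : l.filter (fun x => x != v1 && x != v2) = l :=
      List.filter_eq_self.mpr ((List.length_filter_eq_length_iff).mp heq)
    simp [pvLoopA, this]
  | succ fuel ih =>
    intro l hf
    set p : Int → Bool := fun x => x != v1 && x != v2 with hp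
    have hpn : p nn = true := by simp [hp, h1, h2]
    by_cases hc : l.contains v1 || l.contains v2
    · -- at least one vertex present: unfold one iteration
      rw [pvLoopA, if_pos hc]
      have hpv1 : p v1 = false := by simp [hp]
      have hpv2 : p v2 = false := by simp [hp]
      by_cases hm1 : l.contains v1
      all_goals simp only [hm1, Bool.false_eq_true, ite_true, ite_false]
      · -- v1 ∈ l
        have hm1' : v1 ∈ l := by simpa using hm1
        obtain ⟨hf1, hl1, hlt1⟩ := pv_step l v1 nn p hm1' hpv1 hpn
        set l1 := l.erase v1 ++ [nn] with hl1def
        by_cases hm2 : l1.contains v2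
        all_goals simp only [hm2, Bool.false_eq_true, ite_true, ite_false]
        · have hm2' : v2 ∈ l1 := by simpa using hm2
          obtain ⟨hf2, hl2, hlt2⟩ := pv_step l1 v2 nn p hm2' hpv2 hpn
          set l2 := l1.erase v2 ++ [nn] with hl2def
          have hfl2 : l2.filter p = l.filter p ++ List.replicate 2 nn := by
            rw [hf2, hf1]; simp [List.replicate_succ]
          have hL2 : l2.length = l.length := by rw [hl2, hl1]
          have hr2 : (l.filter p).length + 2 ≤ l.length := by
            have h' := hlt2
            rw [hf1] at h'
            simp only [List.length_append, List.length_cons, List.length_nil] at h'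
            omega
          have hfit : l2.length - (l2.filter p).length ≤ fuel := by
            rw [hL2, hfl2]
            simp only [List.length_append, List.length_replicate]
            omega
          rw [ih l2 hfit, hfl2, hL2]
          exact pv_recombine (l.filter p) nn l.length 2 hr2
        · have hfl1 : l1.filter p = l.filter p ++ List.replicate 1 nn := by
            rw [hf1]; simp [List.replicate_succ]
          have hL1 : l1.length = l.length := hl1
          have hr1 : (l.filter p).length + 1 ≤ l.length := by omega
          have hfit : l1.length - (l1.filter p).length ≤ fuel := by
            rw [hL1, hfl1]
            simp only [List.length_append, List.length_replicate]
            omega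
          rw [ih l1 hfit, hfl1, hL1]
          exact pv_recombine (l.filter p) nn l.length 1 hr1
      · -- v1 ∉ l, so v2 ∈ l
        have hm2 : l.contains v2 := by
          rcases Bool.or_eq_true_iff.mp hc with h | h
          · exact absurd h hm1
          · exact h
        have hm2' : v2 ∈ l := by simpa using hm2
        simp only [hm2, ite_true]
        obtain ⟨hf2, hl2, hlt2⟩ := pv_step l v2 nn p hm2' hpv2 hpn
        set l2 := l.erase v2 ++ [nn] with hl2def
        have hfl2 : l2.filter p = l.filter p ++ List.replicate 1 nn := by
          rw [hf2]; simp [List.replicate_succ]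
        have hr1 : (l.filter p).length + 1 ≤ l.length := by omega
        have hfit : l2.length - (l2.filter p).length ≤ fuel := by
          rw [hl2, hfl2]
          simp only [List.length_append, List.length_replicate]
          omega
        rw [ih l2 hfit, hfl2, hl2]
        exact pv_recombine (l.filter p) nn l.length 1 hr1
    · -- neither vertex present: the loop returns l, and the filter keeps everything
      rw [pvLoopA, if_neg hc]
      have hall : ∀ a ∈ l, p a = true := by
        intro a ha
        simp only [Bool.or_eq_true, List.contains_eq_mem, decide_eq_true_eq] at hc
        push_neg at hc
        have hav1 : a ≠ v1 := fun h => hc.1 (h ▸ ha)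
        have hav2 : a ≠ v2 := fun h => hc.2 (h ▸ ha)
        simp [hp, hav1, hav2]
      have hfl : l.filter p = l := List.filter_eq_self.mpr hall
      simp [hfl]

-- when neither vertex occurs, the loop returns immediately (covers the Pre_ branch that
-- allows new_node ∈ {vertice1, vertice2})
theorem pv_loop_id (v1 v2 nn : Int) (fuel : Nat) (l : List Int)
    (h1 : v1 ∉ l) (h2 : v2 ∉ l) :
    pvLoopA v1 v2 nn fuel l = l := by
  cases fuel with
  | zero => rfl
  | succ fuel =>
    rw [pvLoopA, if_neg]
    simp [h1, h2]

-- ===== VERDICT (by name: the statement is the Claim_ definition above) =====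
theorem remove_old_vertice_while_add_new_spec : Claim_equal_remove_old_vertice_while_add_new := by
  intro array v1 v2 nn _ hpre
  unfold Spec_remove_old_vertice_while_add_new remove_old_vertice_while_add_new
    remove_old_vertice_while_add_new_alt
  rcases hpre with ⟨h1, h2⟩ | ⟨h1, h2⟩
  · exact pv_loop_eq v1 v2 nn h1 h2 array.length array
      (by have := List.length_filter_le (fun x => x != v1 && x != v2) array; omega)
  · rw [pv_loop_id v1 v2 nn array.length array h1 h2]
    have hall : ∀ a ∈ array, (fun x => x != v1 && x != v2) a = true := by
      intro a ha
      have hav1 : a ≠ v1 := fun h => h1 (h ▸ ha)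
      have hav2 : a ≠ v2 := fun h => h2 (h ▸ ha)
      simp [hav1, hav2]
    have hfl : array.filter (fun x => x != v1 && x != v2) = array :=
      List.filter_eq_self.mpr hall
    simp [hfl]
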